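-- pv_equiv track=rewrite | github.com/lidorelias3/Lidor_Elias_Answers | python - Advenced/Humborgeri/line_valid.py | format_spots
-- ===== SOURCE A (Python) =====
-- def format_spots(lines):
--     """
--     Function will convert the lines string to a dict we can work with
--     :param lines: The map in string
--     :return: Dict of spots to each important spot
--     """
--     spots = {'x': [], 'horizontal': [], 'vertical': [], 'corner': []}
--
--     for y in range(len(lines)):
--         for x in range(len(lines[y])):
--             # find X spot
--             if lines[y][x] == 'X':
--                 spots['x'].append((x, y))
--             # find horizontal lines
--             elif lines[y][x] == '-':
--                 spots['horizontal'].append((x, y))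
--             # find vertical lines
--             elif lines[y][x] == '|':
--                 spots['vertical'].append((x, y))
--             # find corners
--             elif lines[y][x] == '+':
--                 spots['corner'].append((x, y))
--             elif lines[y][x] != ' ':
--                 raise ValueError
--     return spots
-- ===== SOURCE B (Python) =====
-- def format_spots(lines):
--     """
--     Function will convert the lines string to a dict we can work with
--     :param lines: The map in string
--     :return: Dict of spots to each important spot
--     """
--     cells = []
--     for y, line in enumerate(lines):
--         for x, ch in enumerate(line):
--             if ch not in 'X-|+ ':
--                 raise ValueError
--             cells.append((x, y, ch))
--     return {'x': [(x, y) for x, y, c in cells if c == 'X'],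
--             'horizontal': [(x, y) for x, y, c in cells if c == '-'],
--             'vertical': [(x, y) for x, y, c in cells if c == '|'],
--             'corner': [(x, y) for x, y, c in cells if c == '+']}
-- ===== Notes on version B (the rewrite author's own statement) =====
-- stated objective: alternative
-- what changed: A classifies each character in one fused double loop that appends into the dict as it scans; B first flattens the grid into a validated list of (x, y, char) cells and then builds each of the four buckets with its own filtering comprehension over that list.
import Mathlib
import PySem

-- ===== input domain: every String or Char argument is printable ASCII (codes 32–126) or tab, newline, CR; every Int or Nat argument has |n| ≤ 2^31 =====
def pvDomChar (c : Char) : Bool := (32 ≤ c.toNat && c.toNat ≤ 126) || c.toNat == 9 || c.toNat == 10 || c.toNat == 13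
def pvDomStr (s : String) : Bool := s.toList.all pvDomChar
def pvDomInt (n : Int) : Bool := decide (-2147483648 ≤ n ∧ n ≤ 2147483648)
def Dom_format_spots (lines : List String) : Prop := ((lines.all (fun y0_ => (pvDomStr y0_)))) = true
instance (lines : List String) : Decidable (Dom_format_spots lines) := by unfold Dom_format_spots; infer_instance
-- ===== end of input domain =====

-- B replaces A's fused classify-and-append double loop by a flatten-into-(x,y,char)-cells pass
-- followed by four per-category filtering passes (objective: alternative decomposition, same cost).


-- ===== PORT A =====
-- Transliteration of A: dict with the four buckets, double index loop, if/elif chain.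
-- Loop indices are always in range, so pyGetD with a dummy default is exact; the final
-- elif's `raise ValueError` (an unknown non-space character) is excluded by Pre_.
def format_spots (lines : List String) : List (String × List (Int × Int)) :=
  let spots0 : PySem.Dict String (List (Int × Int)) :=
    PySem.Dict.ofList [("x", []), ("horizontal", []), ("vertical", []), ("corner", [])]
  let spots :=
    (PySem.List.pyRange 0 (PySem.List.len lines) 1).foldl (fun spots y =>
      (PySem.List.pyRange 0 (PySem.Str.len (PySem.List.pyGetD lines y "")) 1).foldl (fun spots x =>
        let c := PySem.List.pyGetD (PySem.List.pyGetD lines y "").toList x ' '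
        if c = 'X' then spots.modify "x" [] (fun l => l ++ [(x, y)])
        else if c = '-' then spots.modify "horizontal" [] (fun l => l ++ [(x, y)])
        else if c = '|' then spots.modify "vertical" [] (fun l => l ++ [(x, y)])
        else if c = '+' then spots.modify "corner" [] (fun l => l ++ [(x, y)])
        else spots) spots) spots0
  spots.items

-- ===== PORT B =====
-- Transliteration of B (Source B): flatten with enumerate into validated (x, y, ch) cells,
-- then four filtering comprehensions.  The `raise ValueError` branch is excluded by Pre_.
def format_spots_alt (lines : List String) : List (String × List (Int × Int)) :=
  let cells :=
    (PySem.List.enumerate lines).foldl (fun cells q =>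
      (PySem.List.enumerate q.2.toList).foldl (fun cells p =>
        if p.2 = 'X' ∨ p.2 = '-' ∨ p.2 = '|' ∨ p.2 = '+' ∨ p.2 = ' '
        then cells ++ [(p.1, q.1, p.2)]
        else cells) cells) ([] : List (Int × Int × Char))
  [("x", (cells.filter (fun t => t.2.2 == 'X')).map (fun t => (t.1, t.2.1))),
   ("horizontal", (cells.filter (fun t => t.2.2 == '-')).map (fun t => (t.1, t.2.1))),
   ("vertical", (cells.filter (fun t => t.2.2 == '|')).map (fun t => (t.1, t.2.1))),
   ("corner", (cells.filter (fun t => t.2.2 == '+')).map (fun t => (t.1, t.2.1)))]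

-- ===== PRECONDITION & SPEC =====
-- Pre_ excludes exactly the inputs containing a character other than 'X', '-', '|', '+', ' ',
-- on which A (and B) raise ValueError.
def Pre_format_spots (lines : List String) : Prop :=
  (lines.all (fun s => s.toList.all
    (fun c => c == 'X' || c == '-' || c == '|' || c == '+' || c == ' '))) = true
instance (lines : List String) : Decidable (Pre_format_spots lines) := by
  unfold Pre_format_spots; infer_instance

def pvWitness_format_spots : List String := ["+--+", "| X|", "+  +"]

def Spec_format_spots (lines : List String) (out : List (String × List (Int × Int))) : Prop := out = format_spots_alt lines
instance (lines : List String) (out : List (String × List (Int × Int))) : Decidable (Spec_format_spots lines out) := by unfold Spec_format_spots; infer_instance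

-- ===== CLAIM (what is proved, stated in full; the proofs are below) =====
def Claim_equal_format_spots : Prop := ∀ (lines : List String), Dom_format_spots lines → Pre_format_spots lines → Spec_format_spots lines (format_spots lines)

-- ===== LEMMAS AND PROOFS =====

def cellsOf (lines : List String) : List (Int × Int × Char) :=
  (PySem.List.enumerate lines).flatMap
    (fun q => (PySem.List.enumerate q.2.toList).map (fun p => (p.1, q.1, p.2)))

def keyOf (c : Char) : String :=
  if c = 'X' then "x" else if c = '-' then "horizontal" else if c = '|' then "vertical" else "corner"
def Valid (c : Char) : Prop := c = 'X' ∨ c = '-' ∨ c = '|' ∨ c = '+' ∨ c = ' '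
def spotsInit : PySem.Dict String (List (Int × Int)) :=
  PySem.Dict.ofList [("x", []), ("horizontal", []), ("vertical", []), ("corner", [])]
def stepA (spots : PySem.Dict String (List (Int × Int))) (t : Int × Int × Char) :
    PySem.Dict String (List (Int × Int)) :=
  if t.2.2 = 'X' then spots.modify "x" [] (fun l => l ++ [(t.1, t.2.1)])
  else if t.2.2 = '-' then spots.modify "horizontal" [] (fun l => l ++ [(t.1, t.2.1)])
  else if t.2.2 = '|' then spots.modify "vertical" [] (fun l => l ++ [(t.1, t.2.1)])
  else if t.2.2 = '+' then spots.modify "corner" [] (fun l => l ++ [(t.1, t.2.1)])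
  else spots


def bucket (lines : List String) (c : Char) : List (Int × Int) :=
  ((cellsOf lines).filter (fun t => t.2.2 == c)).map (fun t => (t.1, t.2.1))

lemma valid_cells (lines : List String) (hpre : Pre_format_spots lines) :
    ∀ t ∈ cellsOf lines, Valid t.2.2 := by
  intro t ht
  unfold Pre_format_spots at hpre
  simp only [List.all_eq_true] at hpre
  simp only [cellsOf, List.mem_flatMap, List.mem_map] at ht
  obtain ⟨q, hq, p, hp, rfl⟩ := ht
  rw [PySem.List.mem_enumerate_iff] at hq hp
  obtain ⟨k, hk, rfl⟩ := hq
  obtain ⟨j, hj, rfl⟩ := hp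
  have := hpre _ (List.getElem_mem hk) _ (List.getElem_mem hj)
  simp only [Valid]
  rcases Bool.or_eq_true .. |>.mp this with h | h
  · rcases Bool.or_eq_true .. |>.mp h with h | h
    · rcases Bool.or_eq_true .. |>.mp h with h | h
      · rcases Bool.or_eq_true .. |>.mp h with h | h
        · exact Or.inl (by simpa using h)
        · exact Or.inr (Or.inl (by simpa using h))
      · exact Or.inr (Or.inr (Or.inl (by simpa using h)))
    · exact Or.inr (Or.inr (Or.inr (Or.inl (by simpa using h))))
  · exact Or.inr (Or.inr (Or.inr (Or.inr (by simpa using h))))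

lemma alt_eq_buckets (lines : List String) (hpre : Pre_format_spots lines) :
    format_spots_alt lines =
      [("x", bucket lines 'X'), ("horizontal", bucket lines '-'),
       ("vertical", bucket lines '|'), ("corner", bucket lines '+')] := by
  have hv := valid_cells lines hpre
  have hcells :
      (PySem.List.enumerate lines).foldl (fun cells q =>
        (PySem.List.enumerate q.2.toList).foldl (fun cells p =>
          if p.2 = 'X' ∨ p.2 = '-' ∨ p.2 = '|' ∨ p.2 = '+' ∨ p.2 = ' '
          then cells ++ [(p.1, q.1, p.2)]
          else cells) cells) ([] : List (Int × Int × Char)) = cellsOf lines := by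
    have h1 : ∀ q ∈ PySem.List.enumerate lines, ∀ acc : List (Int × Int × Char),
        (PySem.List.enumerate q.2.toList).foldl (fun cells p =>
          if p.2 = 'X' ∨ p.2 = '-' ∨ p.2 = '|' ∨ p.2 = '+' ∨ p.2 = ' '
          then cells ++ [(p.1, q.1, p.2)]
          else cells) acc
        = acc ++ (PySem.List.enumerate q.2.toList).map (fun p => (p.1, q.1, p.2)) := by
      intro q hq acc
      rw [PySem.List.foldl_congr_mem'
          (g := fun cells p => cells ++ [(p.1, q.1, p.2)])]
      · exact PySem.List.foldl_append_singleton_eq_map _ _ _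
      · intro p hp acc'
        have : Valid p.2 := by
          have := hv (p.1, q.1, p.2) (by
            simp only [cellsOf, List.mem_flatMap, List.mem_map]
            exact ⟨q, hq, p, hp, rfl⟩)
          exact this
        simp only [Valid] at this
        rw [if_pos this]
    rw [PySem.List.foldl_congr_mem' _ _
        (g := fun cells q => cells ++ (PySem.List.enumerate q.2.toList).map (fun p => (p.1, q.1, p.2))) _
        (fun q hq acc => h1 q hq acc)]
    rw [PySem.List.foldl_append_eq_flatMap]
    simp [cellsOf]
  simp only [format_spots_alt, hcells, bucket]

lemma keyOf_mem (c : Char) : keyOf c ∈ ["x", "horizontal", "vertical", "corner"] := by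
  unfold keyOf; split_ifs <;> simp

lemma set_update_of_subset (s : List String) (xs : List String) (h : ∀ x ∈ xs, x ∈ s) :
    PySem.Set.update s xs = s := by
  induction xs generalizing s with
  | nil => simp [PySem.Set.update]
  | cons x xs ih =>
    have hs : PySem.Set.add s x = s := PySem.Set.add_of_mem (h x (by simp))
    simp only [PySem.Set.update, List.foldl_cons] at *
    rw [hs]
    exact ih s (fun y hy => h y (by simp [hy]))

lemma fold_items (cells : List (Int × Int × Char)) (hv : ∀ t ∈ cells, Valid t.2.2) :
    (cells.foldl stepA spotsInit).items =
      [("x", (cells.filter (fun t => t.2.2 == 'X')).map (fun t => (t.1, t.2.1))),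
       ("horizontal", (cells.filter (fun t => t.2.2 == '-')).map (fun t => (t.1, t.2.1))),
       ("vertical", (cells.filter (fun t => t.2.2 == '|')).map (fun t => (t.1, t.2.1))),
       ("corner", (cells.filter (fun t => t.2.2 == '+')).map (fun t => (t.1, t.2.1)))] := by
  -- 1. replace stepA by keyOf-modify, skipping blanks
  have h1 : cells.foldl stepA spotsInit
      = cells.foldl (fun d t => if ¬(t.2.2 = ' ')
          then d.modify (keyOf t.2.2) [] (fun l => l ++ [(t.1, t.2.1)]) else d) spotsInit := by
    apply PySem.List.foldl_congr_mem'
    intro t ht d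
    rcases hv t ht with h | h | h | h | h <;> simp [stepA, keyOf, h]
  rw [h1, PySem.List.foldl_ite_eq_foldl_filter (p := fun t : Int × Int × Char => ¬(t.2.2 = ' '))]
  -- 2. fold over the (key, value) pairs
  have h2 : ∀ (l : List (Int × Int × Char)) ,
      l.foldl (fun d t => d.modify (keyOf t.2.2) [] (fun v => v ++ [(t.1, t.2.1)])) spotsInit
      = (l.map (fun t => (keyOf t.2.2, (t.1, t.2.1)))).foldl
          (fun d p => d.modify p.1 [] (fun v => v ++ [p.2])) spotsInit := by
    intro l
    exact (List.foldl_map (f := fun t : Int × Int × Char => (keyOf t.2.2, (t.1, t.2.1)))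
      (g := fun d p => PySem.Dict.modify d p.1 [] (fun v => v ++ [p.2])) (l := l) (init := spotsInit)).symm
  rw [h2]
  set l := cells.filter (fun t => decide ¬(t.2.2 = ' ')) with hl
  set pairs := l.map (fun t => (keyOf t.2.2, (t.1, t.2.1))) with hpairs
  have hmeml : ∀ t ∈ l, Valid t.2.2 ∧ ¬(t.2.2 = ' ') := by
    intro t ht
    rw [hl, List.mem_filter] at ht
    exact ⟨hv t ht.1, by simpa using ht.2⟩
  -- 3. keys are unchanged
  have hkeys : ((pairs.foldl (fun d p => d.modify p.1 [] (fun v => v ++ [p.2])) spotsInit)).keys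
      = ["x", "horizontal", "vertical", "corner"] := by
    have := PySem.Dict.keys_foldl_modify_key pairs Prod.fst []
      (fun _ p => fun v => v ++ [p.2]) spotsInit
    rw [this]
    have hks : spotsInit.keys = ["x", "horizontal", "vertical", "corner"] := by decide
    rw [hks]
    apply set_update_of_subset
    intro x hx
    rw [List.mem_map] at hx
    obtain ⟨p, hp, rfl⟩ := hx
    rw [hpairs, List.mem_map] at hp
    obtain ⟨t, _, rfl⟩ := hp
    exact keyOf_mem t.2.2
  have hnodup : ((pairs.foldl (fun d p => d.modify p.1 [] (fun v => v ++ [p.2])) spotsInit)).keys.Nodup := by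
    rw [hkeys]; decide
  rw [PySem.Dict.items_eq_map_keys _ hnodup [], hkeys]
  -- 4. per-key contents
  have hgetD : ∀ k : String,
      (pairs.foldl (fun d p => d.modify p.1 [] (fun v => v ++ [p.2])) spotsInit).getD k []
      = spotsInit.getD k [] ++ (pairs.filter (fun p => p.1 == k)).map (fun p => p.2) :=
    fun k => PySem.Dict.getD_foldl_modify_append pairs spotsInit k
  have hbucket : ∀ (k : String) (c : Char),
      (∀ ch, Valid ch → ¬(ch = ' ') → ((keyOf ch == k) = (ch == c))) → (' ' == c) = false →
      (pairs.filter (fun p => p.1 == k)).map (fun p => p.2)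
        = (cells.filter (fun t => t.2.2 == c)).map (fun t => (t.1, t.2.1)) := by
    intro k c hk hc
    rw [hpairs, List.filter_map, List.map_map]
    rw [hl, List.filter_filter]
    have : (cells.filter (fun t =>
        ((fun p : String × Int × Int => p.1 == k) ∘ fun t : Int × Int × Char => (keyOf t.2.2, (t.1, t.2.1))) t
          && decide ¬(t.2.2 = ' '))) = cells.filter (fun t => t.2.2 == c) := by
      apply List.filter_congr
      intro t ht
      simp only [Function.comp]
      by_cases hsp : t.2.2 = ' '
      · simp [hsp, hc]
      · rw [hk t.2.2 (hv t ht) hsp]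
        simp [hsp]
    rw [this]
    rfl
  simp only [List.map_cons, List.map_nil, hgetD]
  rw [hbucket "x" 'X' (by intro ch h hs; rcases h with h|h|h|h|h <;> subst h <;> rfl) (by decide),
      hbucket "horizontal" '-' (by intro ch h hs; rcases h with h|h|h|h|h <;> subst h <;> rfl) (by decide),
      hbucket "vertical" '|' (by intro ch h hs; rcases h with h|h|h|h|h <;> subst h <;> rfl) (by decide),
      hbucket "corner" '+' (by intro ch h hs; rcases h with h|h|h|h|h <;> subst h <;> first | rfl | (exact absurd rfl hs)) (by decide)]
  have hx : spotsInit.getD "x" [] = [] := by decide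
  have hh : spotsInit.getD "horizontal" [] = [] := by decide
  have hvv : spotsInit.getD "vertical" [] = [] := by decide
  have hcc : spotsInit.getD "corner" [] = [] := by decide
  simp [hx, hh, hvv, hcc]

lemma a_cells (lines : List String) :
    format_spots lines = ((cellsOf lines).foldl stepA spotsInit).items := by
  have hlen : ∀ s : String, PySem.Str.len s = PySem.List.len s.toList := by
    intro s; simp [pysem]
  have henumS : PySem.List.enumerate lines
      = (PySem.List.pyRange 0 (PySem.List.len lines) 1).map
          (fun j => (j, PySem.List.pyGetD lines j "")) :=
    PySem.List.enumerate_eq_map_pyRange lines ""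
  have henumC : ∀ (cs : List Char), PySem.List.enumerate cs
      = (PySem.List.pyRange 0 (PySem.List.len cs) 1).map
          (fun j => (j, PySem.List.pyGetD cs j ' ')) :=
    fun cs => PySem.List.enumerate_eq_map_pyRange cs ' '
  simp only [format_spots, hlen, cellsOf, List.foldl_flatMap, List.foldl_map, henumS, henumC,
    stepA, spotsInit]

lemma a_eq_buckets (lines : List String) (hpre : Pre_format_spots lines) :
    format_spots lines =
      [("x", bucket lines 'X'), ("horizontal", bucket lines '-'),
       ("vertical", bucket lines '|'), ("corner", bucket lines '+')] := by
  rw [a_cells, fold_items (cellsOf lines) (valid_cells lines hpre)]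
  rfl

-- ===== VERDICT (by name: the statement is the Claim_ definition above) =====
theorem format_spots_spec : Claim_equal_format_spots := by
  intro lines _ hpre
  unfold Spec_format_spots
  rw [a_eq_buckets lines hpre, alt_eq_buckets lines hpre]
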